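-- pv_equiv track=rewrite | github.com/anilrcc/financial-dashboard | generate_services_key_insights.py | find_longest_periods
-- ===== SOURCE A (Python) =====
-- def find_longest_periods(industry_data):
--     """Find the longest consecutive growth and contraction periods"""
--     max_growth = 0
--     max_contraction = 0
--     current_growth = 0
--     current_contraction = 0
--
--     for value in industry_data:
--         if value > 0:
--             current_growth += 1
--             current_contraction = 0
--             max_growth = max(max_growth, current_growth)
--         elif value < 0:
--             current_contraction += 1
--             current_growth = 0
--             max_contraction = max(max_contraction, current_contraction)
--         else:
--             current_growth = 0
--             current_contraction = 0
--
--     return max_growth, max_contraction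
-- ===== SOURCE B (Python) =====
-- def find_longest_periods(industry_data):
--     """Find the longest consecutive growth and contraction periods.
--     Run-jumping scan: segment the data into maximal same-sign runs and
--     take the longest positive and negative run lengths."""
--     max_growth = 0
--     max_contraction = 0
--     i = 0
--     n = len(industry_data)
--     while i < n:
--         v = industry_data[i]
--         s = (v > 0) - (v < 0)
--         j = i + 1
--         while j < n and ((industry_data[j] > 0) - (industry_data[j] < 0)) == s:
--             j += 1
--         if s > 0:
--             max_growth = max(max_growth, j - i)
--         elif s < 0:
--             max_contraction = max(max_contraction, j - i)
--         i = j
--     return max_growth, max_contraction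
-- ===== Notes on version B (the rewrite author's own statement) =====
-- stated objective: alternative
-- what changed: Replaces A's per-element streak counters (current_growth/current_contraction reset and bumped on every element) with a run-jumping scan that finds each maximal same-sign run in one inner advance and compares whole run lengths against the two maxima.
import Mathlib
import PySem

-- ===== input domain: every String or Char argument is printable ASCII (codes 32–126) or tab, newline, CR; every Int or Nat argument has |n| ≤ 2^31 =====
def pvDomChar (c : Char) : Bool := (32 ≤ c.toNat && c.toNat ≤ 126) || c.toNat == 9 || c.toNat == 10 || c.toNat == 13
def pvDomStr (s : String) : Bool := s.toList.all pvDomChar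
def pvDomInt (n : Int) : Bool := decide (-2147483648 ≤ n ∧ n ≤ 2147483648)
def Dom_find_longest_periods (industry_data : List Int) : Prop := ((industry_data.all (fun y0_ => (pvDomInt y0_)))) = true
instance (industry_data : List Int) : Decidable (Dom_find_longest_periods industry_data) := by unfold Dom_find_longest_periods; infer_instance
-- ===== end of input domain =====

-- B replaces A's per-element streak counters with a run-jumping scan over maximal
-- same-sign runs (objective: alternative decomposition, same O(n) cost).

-- ===== PORT A =====
-- one iteration of A's for-loop over the state (max_growth, max_contraction, current_growth, current_contraction)
def pvStepA : Int × Int × Int × Int → Int → Int × Int × Int × Int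
  | (mg, mc, cg, cc), value =>
    if value > 0 then (max mg (cg + 1), mc, cg + 1, 0)
    else if value < 0 then (mg, max mc (cc + 1), 0, cc + 1)
    else (mg, mc, 0, 0)

def find_longest_periods (industry_data : List Int) : Int × Int :=
  let st := industry_data.foldl pvStepA (0, 0, 0, 0)
  (st.1, st.2.1)

-- ===== PORT B =====
-- s = (v > 0) - (v < 0)
def pvSign (v : Int) : Int := (if v > 0 then 1 else 0) - (if v < 0 then 1 else 0)

-- B's outer while loop: each call consumes one maximal run of equal sign
-- (the inner `while j < n and sign == s` scan is the takeWhile/dropWhile split)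
def pvLoopB (mg mc : Int) (l : List Int) : Int × Int :=
  match l with
  | [] => (mg, mc)
  | v :: t =>
    let len : Int := ((1 + (t.takeWhile (fun x => pvSign x == pvSign v)).length : Nat) : Int)
    let rest := t.dropWhile (fun x => pvSign x == pvSign v)
    if pvSign v > 0 then pvLoopB (max mg len) mc rest
    else if pvSign v < 0 then pvLoopB mg (max mc len) rest
    else pvLoopB mg mc rest
termination_by l.length
decreasing_by
  all_goals
    have := List.length_dropWhile_le (fun x => pvSign x == pvSign v) t
    simp; omega

def find_longest_periods_alt (industry_data : List Int) : Int × Int :=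
  pvLoopB 0 0 industry_data

-- ===== PRECONDITION & SPEC =====
def Spec_find_longest_periods (industry_data : List Int) (out : Int × Int) : Prop := out = find_longest_periods_alt industry_data
instance (industry_data : List Int) (out : Int × Int) : Decidable (Spec_find_longest_periods industry_data out) := by unfold Spec_find_longest_periods; infer_instance

-- ===== CLAIM (what is proved, stated in full; the proofs are below) =====
def Claim_equal_find_longest_periods : Prop := ∀ (industry_data : List Int), Dom_find_longest_periods industry_data → Spec_find_longest_periods industry_data (find_longest_periods industry_data)

-- ===== LEMMAS AND PROOFS =====

theorem pvSign_pos {v : Int} (h : 0 < v) : pvSign v = 1 := by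
  unfold pvSign; split_ifs <;> omega

theorem pvSign_neg {v : Int} (h : v < 0) : pvSign v = -1 := by
  unfold pvSign; split_ifs <;> omega

theorem pvSign_zero {v : Int} (h : v = 0) : pvSign v = 0 := by
  subst h; decide

theorem pvSign_eq_one {x : Int} (h : pvSign x = 1) : 0 < x := by
  unfold pvSign at h; split_ifs at h <;> omega

theorem pvSign_eq_neg_one {x : Int} (h : pvSign x = -1) : x < 0 := by
  unfold pvSign at h; split_ifs at h <;> omega

theorem pvSign_eq_zero {x : Int} (h : pvSign x = 0) : x = 0 := by
  unfold pvSign at h; split_ifs at h <;> omega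

theorem pvDropWhile_head {p : Int → Bool} {t : List Int} {x : Int} {r : List Int}
    (h : t.dropWhile p = x :: r) : p x = false := by
  induction t with
  | nil => simp at h
  | cons a t ih =>
    rw [List.dropWhile_cons] at h
    split at h
    · exact ih h
    · cases h; simp_all

-- consuming a maximal positive run v :: run from A's state
theorem pvFoldA_pos_run (run : List Int) :
    ∀ (rest : List Int) (v mg mc cg cc : Int), 0 < v → (∀ x ∈ run, 0 < x) →
    List.foldl pvStepA (mg, mc, cg, cc) (v :: (run ++ rest)) =
      List.foldl pvStepA (max mg (cg + 1 + run.length), mc, cg + 1 + run.length, 0) rest := by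
  induction run with
  | nil =>
    intro rest v mg mc cg cc hv _
    simp [pvStepA, hv]
  | cons w run ih =>
    intro rest v mg mc cg cc hv hrun
    have hw : 0 < w := hrun w (by simp)
    have hfold : List.foldl pvStepA (mg, mc, cg, cc) (v :: (w :: run ++ rest)) =
        List.foldl pvStepA (max mg (cg + 1), mc, cg + 1, 0) (w :: (run ++ rest)) := by
      simp [pvStepA, hv]
    rw [hfold, ih rest w (max mg (cg + 1)) mc (cg + 1) 0 hw (fun x hx => hrun x (by simp [hx]))]
    have hmax : max (max mg (cg + 1)) (cg + 1 + 1 + (run.length : Int)) =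
        max mg (cg + 1 + ((w :: run).length : Int)) := by
      simp only [List.length_cons]; push_cast; omega
    have hlen : cg + 1 + 1 + (run.length : Int) = cg + 1 + ((w :: run).length : Int) := by
      simp only [List.length_cons]; push_cast; omega
    rw [hmax, hlen]

-- consuming a maximal negative run
theorem pvFoldA_neg_run (run : List Int) :
    ∀ (rest : List Int) (v mg mc cg cc : Int), v < 0 → (∀ x ∈ run, x < 0) →
    List.foldl pvStepA (mg, mc, cg, cc) (v :: (run ++ rest)) =
      List.foldl pvStepA (mg, max mc (cc + 1 + run.length), 0, cc + 1 + run.length) rest := by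
  induction run with
  | nil =>
    intro rest v mg mc cg cc hv _
    have : ¬ v > 0 := by omega
    simp [pvStepA, hv, this]
  | cons w run ih =>
    intro rest v mg mc cg cc hv hrun
    have hw : w < 0 := hrun w (by simp)
    have hv' : ¬ v > 0 := by omega
    have hfold : List.foldl pvStepA (mg, mc, cg, cc) (v :: (w :: run ++ rest)) =
        List.foldl pvStepA (mg, max mc (cc + 1), 0, cc + 1) (w :: (run ++ rest)) := by
      simp [pvStepA, hv, hv']
    rw [hfold, ih rest w mg (max mc (cc + 1)) 0 (cc + 1) hw (fun x hx => hrun x (by simp [hx]))]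
    have hmax : max (max mc (cc + 1)) (cc + 1 + 1 + (run.length : Int)) =
        max mc (cc + 1 + ((w :: run).length : Int)) := by
      simp only [List.length_cons]; push_cast; omega
    have hlen : cc + 1 + 1 + (run.length : Int) = cc + 1 + ((w :: run).length : Int) := by
      simp only [List.length_cons]; push_cast; omega
    rw [hmax, hlen]

-- consuming a maximal zero run resets both counters
theorem pvFoldA_zero_run (run : List Int) :
    ∀ (rest : List Int) (v mg mc cg cc : Int), v = 0 → (∀ x ∈ run, x = 0) →
    List.foldl pvStepA (mg, mc, cg, cc) (v :: (run ++ rest)) =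
      List.foldl pvStepA (mg, mc, 0, 0) rest := by
  induction run with
  | nil =>
    intro rest v mg mc cg cc hv _
    subst hv; simp [pvStepA]
  | cons w run ih =>
    intro rest v mg mc cg cc hv hrun
    subst hv
    have hfold : List.foldl pvStepA (mg, mc, cg, cc) (0 :: (w :: run ++ rest)) =
        List.foldl pvStepA (mg, mc, 0, 0) (w :: (run ++ rest)) := by
      simp [pvStepA]
    rw [hfold, ih rest w mg mc 0 0 (hrun w (by simp)) (fun x hx => hrun x (by simp [hx]))]

-- current_growth is irrelevant when the next element is not positive
theorem pvFoldA_cg_irrel (x : Int) (r : List Int) (mg mc cg cg' cc : Int) (hx : ¬ 0 < x) :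
    List.foldl pvStepA (mg, mc, cg, cc) (x :: r) = List.foldl pvStepA (mg, mc, cg', cc) (x :: r) := by
  simp only [List.foldl_cons, pvStepA]
  split_ifs <;> first | rfl | omega

-- current_contraction is irrelevant when the next element is not negative
theorem pvFoldA_cc_irrel (x : Int) (r : List Int) (mg mc cg cc cc' : Int) (hx : ¬ x < 0) :
    List.foldl pvStepA (mg, mc, cg, cc) (x :: r) = List.foldl pvStepA (mg, mc, cg, cc') (x :: r) := by
  simp only [List.foldl_cons, pvStepA]
  split_ifs <;> rfl

-- main invariant: B's run-jumping loop computes the (max_growth, max_contraction)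
-- projection of A's fold, for any starting maxima
theorem pvMain : ∀ (n : Nat) (l : List Int), l.length ≤ n → ∀ (mg mc : Int),
    pvLoopB mg mc l =
      ((List.foldl pvStepA (mg, mc, 0, 0) l).1, (List.foldl pvStepA (mg, mc, 0, 0) l).2.1) := by
  intro n
  induction n with
  | zero =>
    intro l hl mg mc
    have : l = [] := List.eq_nil_of_length_eq_zero (by omega)
    subst this
    rw [pvLoopB]
    rfl
  | succ n ih =>
    intro l hl mg mc
    match l with
    | [] => rw [pvLoopB]; rfl
    | v :: t =>
      set run := t.takeWhile (fun x => pvSign x == pvSign v) with hrun_def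
      set rest := t.dropWhile (fun x => pvSign x == pvSign v) with hrest_def
      have hsplit : run ++ rest = t := List.takeWhile_append_dropWhile
      have hrest_len : rest.length ≤ n := by
        have h1 := List.length_dropWhile_le (fun x => pvSign x == pvSign v) t
        rw [hrest_def]
        simp at hl
        omega
      have hrun_sign : ∀ x ∈ run, pvSign x = pvSign v := by
        intro x hx
        have := List.mem_takeWhile_imp hx
        simpa using this
      have hrest_sign : ∀ x, rest.head? = some x → pvSign x ≠ pvSign v := by
        intro x hx
        cases hh : rest with
        | nil => rw [hh] at hx; simp at hx
        | cons y r' =>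
          rw [hh] at hx
          simp at hx
          subst hx
          have := pvDropWhile_head (hrest_def ▸ hh)
          simpa using this
      clear_value run rest
      rcases lt_trichotomy v 0 with hv | hv | hv
      · -- negative run
        have hs : pvSign v = -1 := pvSign_neg hv
        have hc1 : ¬ pvSign v > 0 := by omega
        have hc2 : pvSign v < 0 := by omega
        have hloop : pvLoopB mg mc (v :: t) =
            pvLoopB mg (max mc ((1 + run.length : Nat) : Int)) rest := by
          rw [pvLoopB]
          simp only [← hrun_def, ← hrest_def, if_neg hc1, if_pos hc2]
        rw [hloop, ih rest hrest_len]
        have hA : List.foldl pvStepA (mg, mc, 0, 0) (v :: t) =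
            List.foldl pvStepA (mg, max mc (0 + 1 + run.length), 0, 0 + 1 + run.length) rest := by
          conv_lhs => rw [← hsplit]
          exact pvFoldA_neg_run run rest v mg mc 0 0 hv
            (fun x hx => pvSign_eq_neg_one (by rw [hrun_sign x hx, hs]))
        rw [hA]
        have hmc : max mc ((1 + run.length : Nat) : Int) = max mc (0 + 1 + (run.length : Int)) := by
          push_cast; omega
        rw [hmc]
        cases rest with
        | nil => rfl
        | cons x r' =>
          have hx : ¬ x < 0 := fun hneg => hrest_sign x rfl (by rw [pvSign_neg hneg, hs])
          rw [pvFoldA_cc_irrel x r' mg (max mc (0 + 1 + run.length)) 0 (0 + 1 + run.length) 0 hx]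
      · -- zero run
        have hs : pvSign v = 0 := pvSign_zero hv
        have hc1 : ¬ pvSign v > 0 := by omega
        have hc2 : ¬ pvSign v < 0 := by omega
        have hloop : pvLoopB mg mc (v :: t) = pvLoopB mg mc rest := by
          rw [pvLoopB]
          simp only [← hrun_def, ← hrest_def, if_neg hc1, if_neg hc2]
        rw [hloop, ih rest hrest_len]
        have hA : List.foldl pvStepA (mg, mc, 0, 0) (v :: t) =
            List.foldl pvStepA (mg, mc, 0, 0) rest := by
          conv_lhs => rw [← hsplit]
          exact pvFoldA_zero_run run rest v mg mc 0 0 hv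
            (fun x hx => pvSign_eq_zero (by rw [hrun_sign x hx, hs]))
        rw [hA]
      · -- positive run
        have hs : pvSign v = 1 := pvSign_pos hv
        have hc1 : pvSign v > 0 := by omega
        have hloop : pvLoopB mg mc (v :: t) =
            pvLoopB (max mg ((1 + run.length : Nat) : Int)) mc rest := by
          rw [pvLoopB]
          simp only [← hrun_def, ← hrest_def, if_pos hc1]
        rw [hloop, ih rest hrest_len]
        have hA : List.foldl pvStepA (mg, mc, 0, 0) (v :: t) =
            List.foldl pvStepA (max mg (0 + 1 + run.length), mc, 0 + 1 + run.length, 0) rest := by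
          conv_lhs => rw [← hsplit]
          exact pvFoldA_pos_run run rest v mg mc 0 0 hv
            (fun x hx => pvSign_eq_one (by rw [hrun_sign x hx, hs]))
        rw [hA]
        have hmg : max mg ((1 + run.length : Nat) : Int) = max mg (0 + 1 + (run.length : Int)) := by
          push_cast; omega
        rw [hmg]
        cases rest with
        | nil => rfl
        | cons x r' =>
          have hx : ¬ 0 < x := fun hpos => hrest_sign x rfl (by rw [pvSign_pos hpos, hs])
          rw [pvFoldA_cg_irrel x r' (max mg (0 + 1 + run.length)) mc (0 + 1 + run.length) 0 0 hx]

-- ===== VERDICT (by name: the statement is the Claim_ definition above) =====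
theorem find_longest_periods_spec : Claim_equal_find_longest_periods := by
  intro industry_data _
  unfold Spec_find_longest_periods find_longest_periods find_longest_periods_alt
  exact (pvMain industry_data.length industry_data le_rfl 0 0).symm
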